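-- pv_equiv track=rewrite | github.com/rml-unist/roro-shipping-opt | problem_generator.py | _is_layer_connected
-- ===== SOURCE A (Python) =====
-- def _is_layer_connected(width, height, z, holes, gate):
--     """Check if a layer remains connected after removing holes."""
--     cells = set()
--     for x in range(width):
--         for y in range(height):
--             coord = (x, y, z)
--             if coord not in holes:
--                 cells.add(coord)
--
--     if not cells:
--         return z != 0  # Empty layer OK if not gate layer
--
--     # BFS to check connectivity within layer
--     start = next(iter(cells))
--     visited = {start}
--     queue = [start]
--
--     while queue:
--         x, y, _ = queue.pop(0)
--         for dx, dy in [(1,0), (-1,0), (0,1), (0,-1)]: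
--             nb = (x+dx, y+dy, z)
--             if nb in cells and nb not in visited:
--                 visited.add(nb)
--                 queue.append(nb)
--
--     return len(visited) == len(cells)
-- ===== SOURCE B (Python) =====
-- def _is_layer_connected(width, height, z, holes, gate):
--     """Check if a layer remains connected after removing holes.
--
--     Queue-free variant: level-synchronous flood; each round the next frontier
--     is the neighbour set of the current frontier restricted to the still
--     unreached cells; the layer is connected iff nothing remains unreached."""
--     cells = set()
--     for x in range(width):
--         for y in range(height):
--             coord = (x, y, z)
--             if coord not in holes:
--                 cells.add(coord)
--
--     if not cells:
--         return z != 0  # Empty layer OK if not gate layer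
--
--     start = next(iter(cells))
--     frontier = {start}
--     remaining = cells - {start}
--     while frontier:
--         reach = {(x + dx, y + dy, z)
--                  for (x, y, _zz) in frontier
--                  for dx, dy in ((1, 0), (-1, 0), (0, 1), (0, -1))}
--         frontier = reach & remaining
--         remaining -= frontier
--     return not remaining
-- ===== Notes on version B (the rewrite author's own statement) =====
-- stated objective: alternative
-- what changed: Replaces the BFS (visited set + FIFO queue popped cell by cell) with a queue-free level-synchronous flood: each round the next frontier is the set of still-remaining cells touching the current frontier, the remaining set shrinks by it, and the layer is connected iff nothing remains.
import Mathlib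
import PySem

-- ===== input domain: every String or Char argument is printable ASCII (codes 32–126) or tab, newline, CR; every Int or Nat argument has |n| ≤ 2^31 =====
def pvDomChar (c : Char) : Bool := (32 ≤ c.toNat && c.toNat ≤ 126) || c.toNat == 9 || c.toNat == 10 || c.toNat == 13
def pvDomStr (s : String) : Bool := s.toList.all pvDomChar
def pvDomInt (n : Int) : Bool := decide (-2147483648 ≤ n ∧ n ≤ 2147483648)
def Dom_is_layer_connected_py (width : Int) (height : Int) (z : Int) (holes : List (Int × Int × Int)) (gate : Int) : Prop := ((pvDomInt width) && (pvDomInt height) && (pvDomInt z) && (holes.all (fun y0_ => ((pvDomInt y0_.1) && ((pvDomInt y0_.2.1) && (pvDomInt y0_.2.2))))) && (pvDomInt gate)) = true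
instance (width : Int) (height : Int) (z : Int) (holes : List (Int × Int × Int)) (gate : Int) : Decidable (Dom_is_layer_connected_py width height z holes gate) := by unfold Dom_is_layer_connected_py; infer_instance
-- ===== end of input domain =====

-- B replaces A's BFS (visited set + FIFO queue) by a queue-free level-synchronous flood:
-- each round the next frontier is the current frontier's neighbour set intersected with the
-- still-unreached 'remaining' set, and the layer is connected iff nothing remains (objective:
-- alternative). The Python set-iteration orders (`next(iter(cells))`, the comprehensions over
-- sets) do not influence the returned Bool (connectivity is start- and order-independent),
-- so both ports use the insertion order of the identically built cell set.

-- shared helper: the cell set both Pythons build with the identical loop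
def pvCells (width height z : Int) (holes : List (Int × Int × Int)) : PySem.Set (Int × Int × Int) :=
  (PySem.List.pyRange 0 width 1).foldl (fun s x =>
    (PySem.List.pyRange 0 height 1).foldl (fun s y =>
      if (x, y, z) ∈ holes then s else PySem.Set.add s (x, y, z)) s) []

-- shared helper: the four grid neighbours [(x+dx, y+dy, z) for dx,dy in [(1,0),(-1,0),(0,1),(0,-1)]]
def pvNbrs (z x y : Int) : List (Int × Int × Int) :=
  [(x + 1, y, z), (x - 1, y, z), (x, y + 1, z), (x, y - 1, z)]

-- ===== PORT A =====
-- body of A's inner `for dx, dy in …` loop: `if nb in cells and nb not in visited: visited.add(nb); queue.append(nb)`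
def pvBfsStep (cells : List (Int × Int × Int))
    (st : PySem.Set (Int × Int × Int) × List (Int × Int × Int)) (nb : Int × Int × Int) :
    PySem.Set (Int × Int × Int) × List (Int × Int × Int) :=
  if nb ∈ cells ∧ nb ∉ st.1 then (PySem.Set.add st.1 nb, st.2 ++ [nb]) else st

-- A's `while queue:` loop; fuel is only a totality guard (2*len(cells)+1 is proved sufficient below)
def pvBfs (cells : List (Int × Int × Int)) (z : Int) :
    Nat → PySem.Set (Int × Int × Int) → List (Int × Int × Int) → PySem.Set (Int × Int × Int)
  | 0, visited, _ => visited
  | _ + 1, visited, [] => visited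
  | fuel + 1, visited, c :: queue =>
      let st := (pvNbrs z c.1 c.2.1).foldl (pvBfsStep cells) (visited, queue)
      pvBfs cells z fuel st.1 st.2

def is_layer_connected_py (width : Int) (height : Int) (z : Int) (holes : List (Int × Int × Int)) (gate : Int) : Bool :=
  let cells := pvCells width height z holes
  match cells with
  | [] => decide (z ≠ 0)
  | start :: _ =>
      let visited := pvBfs cells z (2 * cells.length + 1) [start] [start]
      decide (visited.length = cells.length)

-- ===== PORT B =====
-- B's neighbour-set comprehension `{(x+dx, y+dy, z) for (x, y, _zz) in frontier for dx, dy in …}`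
def pvReachSet (z : Int) (frontier : PySem.Set (Int × Int × Int)) : PySem.Set (Int × Int × Int) :=
  frontier.foldl (fun s c => (pvNbrs z c.1 c.2.1).foldl PySem.Set.add s) []

-- B's `while frontier:` loop; fuel is only a totality guard (len(cells) is proved sufficient below)
def pvLevels (cells : List (Int × Int × Int)) (z : Int) :
    Nat → PySem.Set (Int × Int × Int) → PySem.Set (Int × Int × Int) → PySem.Set (Int × Int × Int)
  | 0, _, remaining => remaining
  | fuel + 1, frontier, remaining =>
      if frontier.isEmpty then remaining
      else
        let newf := PySem.Set.inter (pvReachSet z frontier) remaining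
        pvLevels cells z fuel newf (PySem.Set.diff remaining newf)

def is_layer_connected_py_alt (width : Int) (height : Int) (z : Int) (holes : List (Int × Int × Int)) (gate : Int) : Bool :=
  let cells := pvCells width height z holes
  match cells with
  | [] => decide (z ≠ 0)
  | start :: _ =>
      let remaining := pvLevels cells z cells.length [start] (PySem.Set.diff cells [start])
      remaining.isEmpty

-- ===== PRECONDITION & SPEC =====
def Spec_is_layer_connected_py (width : Int) (height : Int) (z : Int) (holes : List (Int × Int × Int)) (gate : Int) (out : Bool) : Prop := out = is_layer_connected_py_alt width height z holes gate
instance (width : Int) (height : Int) (z : Int) (holes : List (Int × Int × Int)) (gate : Int) (out : Bool) : Decidable (Spec_is_layer_connected_py width height z holes gate out) := by unfold Spec_is_layer_connected_py; infer_instance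

-- ===== CLAIM (what is proved, stated in full; the proofs are below) =====
def Claim_equal_is_layer_connected_py : Prop := ∀ (width : Int) (height : Int) (z : Int) (holes : List (Int × Int × Int)) (gate : Int), Dom_is_layer_connected_py width height z holes gate → Spec_is_layer_connected_py width height z holes gate (is_layer_connected_py width height z holes gate)

-- ===== LEMMAS AND PROOFS =====

-- grid adjacency (same layer, one step in x or y)
def pvAdj (a b : Int × Int × Int) : Prop := b ∈ pvNbrs a.2.2 a.1 a.2.1

-- reachability inside the cell set from the start cell
inductive pvReach (cells : List (Int × Int × Int)) (s : Int × Int × Int) : (Int × Int × Int) → Prop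
  | base : pvReach cells s s
  | step {a b : Int × Int × Int} : pvReach cells s a → b ∈ cells → pvAdj a b → pvReach cells s b

-- what both traversals compute: a duplicate-free enumeration of the reachable cells
def pvGood (cells : List (Int × Int × Int)) (s : Int × Int × Int) (V : List (Int × Int × Int)) : Prop :=
  V.Nodup ∧ s ∈ V ∧ (∀ c ∈ V, c ∈ cells) ∧ (∀ c ∈ V, pvReach cells s c) ∧
    (∀ a ∈ V, ∀ b ∈ cells, pvAdj a b → b ∈ V)

theorem pvAdj_rev {z x y : Int} {nb : Int × Int × Int} (h : nb ∈ pvNbrs z x y) :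
    pvAdj nb (x, y, z) := by
  simp only [pvNbrs, List.mem_cons, List.not_mem_nil, or_false] at h
  rcases h with h | h | h | h <;> subst h <;> simp [pvAdj, pvNbrs, Prod.ext_iff]

theorem pvAdj_symm {a b : Int × Int × Int} (h : pvAdj a b) : pvAdj b a :=
  pvAdj_rev h

theorem pvGood_mem {cells : List (Int × Int × Int)} {s c : Int × Int × Int}
    {V : List (Int × Int × Int)} (hV : pvGood cells s V) : c ∈ V ↔ pvReach cells s c := by
  obtain ⟨_, hs, _, hr, hcl⟩ := hV
  constructor
  · exact hr c
  · intro h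
    induction h with
    | base => exact hs
    | step ha hb hadj ih => exact hcl _ ih _ hb hadj

-- foldl preserves any invariant its step preserves
theorem pvFoldPres {α σ : Type} (P : σ → Prop) (f : σ → α → σ)
    (hf : ∀ s a, P s → P (f s a)) : ∀ (l : List α) (s : σ), P s → P (l.foldl f s) := by
  intro l
  induction l with
  | nil => intro s h; exact h
  | cons a l ih => intro s h; exact ih _ (hf s a h)

-- the cell set is duplicate-free and lies in layer z
theorem pvCells_spec (width height z : Int) (holes : List (Int × Int × Int)) :
    (pvCells width height z holes).Nodup ∧ ∀ c ∈ pvCells width height z holes, c.2.2 = z := by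
  unfold pvCells
  refine pvFoldPres (fun s : PySem.Set (Int × Int × Int) => s.Nodup ∧ ∀ c ∈ s, c.2.2 = z)
    _ ?_ _ _ ⟨List.nodup_nil, by simp⟩
  intro s x hs
  refine pvFoldPres (fun s : PySem.Set (Int × Int × Int) => s.Nodup ∧ ∀ c ∈ s, c.2.2 = z)
    _ ?_ _ _ hs
  intro s y hs
  split
  · exact hs
  · refine ⟨PySem.Set.nodup_add _ _ hs.1, ?_⟩
    intro c hc
    rw [PySem.Set.mem_add] at hc
    rcases hc with hc | hc
    · exact hs.2 c hc
    · subst hc; rfl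

-- helper used on both sides: a Nodup sublist at least as long as its Nodup superlist is all of it
theorem pvNodupSubsetFull {l1 l2 : List (Int × Int × Int)} (h1 : l1.Nodup) (h2 : l2.Nodup)
    (hs : ∀ x ∈ l1, x ∈ l2) (hl : l2.length ≤ l1.length) : ∀ x ∈ l2, x ∈ l1 := by
  have c1 := List.toFinset_card_of_nodup h1
  have c2 := List.toFinset_card_of_nodup h2
  have hf : l1.toFinset = l2.toFinset := by
    apply Finset.eq_of_subset_of_card_le
    · intro a ha
      rw [List.mem_toFinset] at ha ⊢
      exact hs a ha
    · omega
  intro x hx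
  have hx2 : x ∈ l2.toFinset := List.mem_toFinset.mpr hx
  rw [← hf] at hx2
  exact List.mem_toFinset.mp hx2

theorem pvReach_mem {cells : List (Int × Int × Int)} {s c : Int × Int × Int}
    (h : pvReach cells s c) (hs : s ∈ cells) : c ∈ cells := by
  induction h with
  | base => exact hs
  | step _ hb _ _ => exact hb

-- ---- B side ----

theorem pvReachSet_mem_aux (z : Int) (c : Int × Int × Int) :
    ∀ (F : List (Int × Int × Int)) (S : PySem.Set (Int × Int × Int)),
      c ∈ F.foldl (fun s f => (pvNbrs z f.1 f.2.1).foldl PySem.Set.add s) S ↔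
        c ∈ S ∨ ∃ f ∈ F, c ∈ pvNbrs z f.1 f.2.1 := by
  intro F
  induction F with
  | nil => intro S; simp
  | cons f F ih =>
      intro S
      rw [List.foldl_cons, ih,
        show (pvNbrs z f.1 f.2.1).foldl PySem.Set.add S = PySem.Set.update S (pvNbrs z f.1 f.2.1)
          from rfl]
      simp [PySem.Set.mem_update]
      tauto

theorem pvReachSet_mem (z : Int) (F : PySem.Set (Int × Int × Int)) (c : Int × Int × Int) :
    c ∈ pvReachSet z F ↔ ∃ f ∈ F, c ∈ pvNbrs z f.1 f.2.1 := by
  unfold pvReachSet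
  rw [pvReachSet_mem_aux]
  simp

-- shared exit argument: once the frontier captures nothing, 'remaining' is
-- empty exactly when every cell is reachable
theorem pvExit {cells : List (Int × Int × Int)} {s : Int × Int × Int}
    {R : List (Int × Int × Int)} (hs : s ∈ cells)
    (hRc : ∀ c ∈ R, c ∈ cells) (hsR : s ∉ R)
    (hreach : ∀ c ∈ cells, c ∉ R → pvReach cells s c)
    (hcap : ∀ c ∈ R, ∀ b ∈ cells, pvAdj c b → b ∈ R) :
    (R.isEmpty = true ↔ ∀ c ∈ cells, pvReach cells s c) := by
  rw [List.isEmpty_iff]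
  constructor
  · intro hR c hc
    refine hreach c hc ?_
    rw [hR]
    exact List.not_mem_nil
  · intro hall
    have hnotin : ∀ d, pvReach cells s d → d ∉ R := by
      intro d hd
      induction hd with
      | base => exact hsR
      | step h1 hb hadj ih =>
          intro hbR
          exact ih (hcap _ hbR _ (pvReach_mem h1 hs) (pvAdj_symm hadj))
    rw [List.eq_nil_iff_forall_not_mem]
    intro d hd
    exact hnotin d (hall d (hRc d hd)) hd

theorem pvLevels_iff {cells : List (Int × Int × Int)} {z : Int} {s : Int × Int × Int}
    (hz : ∀ c ∈ cells, c.2.2 = z) (hs : s ∈ cells) :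
    ∀ (fuel : Nat) (F R : List (Int × Int × Int)), R.Nodup →
      (∀ c ∈ F, c ∈ cells) → (∀ c ∈ F, c ∉ R) → (∀ c ∈ R, c ∈ cells) → s ∉ R →
      (∀ c ∈ cells, c ∉ R → pvReach cells s c) →
      (∀ c ∈ R, ∀ b ∈ cells, pvAdj c b → b ∈ R ∨ b ∈ F) →
      (F ≠ [] → R.length + 1 ≤ fuel) →
      ((pvLevels cells z fuel F R).isEmpty = true ↔ ∀ c ∈ cells, pvReach cells s c) := by
  intro fuel
  induction fuel with
  | zero =>
      intro F R hRn hFc hFR hRc hsR hreach hcap hfuel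
      have hF : F = [] := by
        by_contra h
        have := hfuel h
        omega
      subst hF
      exact pvExit hs hRc hsR hreach (fun c hc b hb hadj =>
        (hcap c hc b hb hadj).resolve_right (List.not_mem_nil))
  | succ fuel ih =>
      intro F R hRn hFc hFR hRc hsR hreach hcap hfuel
      by_cases hFe : F.isEmpty = true
      · have hF := List.isEmpty_iff.mp hFe
        subst hF
        rw [show pvLevels cells z (fuel + 1) [] R = R from by simp [pvLevels]]
        exact pvExit hs hRc hsR hreach (fun c hc b hb hadj =>
          (hcap c hc b hb hadj).resolve_right (List.not_mem_nil))
      · rw [show pvLevels cells z (fuel + 1) F R =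
            pvLevels cells z fuel (PySem.Set.inter (pvReachSet z F) R)
              (PySem.Set.diff R (PySem.Set.inter (pvReachSet z F) R)) from by
          simp [pvLevels, hFe]]
        have hnewf : ∀ c : Int × Int × Int,
            c ∈ PySem.Set.inter (pvReachSet z F) R ↔
              (∃ f ∈ F, c ∈ pvNbrs z f.1 f.2.1) ∧ c ∈ R := by
          intro c
          rw [PySem.Set.mem_inter _ _ c, pvReachSet_mem]
        have hdiffmem : ∀ c : Int × Int × Int,
            c ∈ PySem.Set.diff R (PySem.Set.inter (pvReachSet z F) R) ↔
              c ∈ R ∧ c ∉ PySem.Set.inter (pvReachSet z F) R :=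
          fun c => PySem.Set.mem_diff _ _ c
        refine ih (PySem.Set.inter (pvReachSet z F) R)
          (PySem.Set.diff R (PySem.Set.inter (pvReachSet z F) R)) ?_ ?_ ?_ ?_ ?_ ?_ ?_ ?_
        · exact PySem.Set.nodup_diff _ _ hRn
        · intro c hc
          exact hRc c ((hnewf c).mp hc).2
        · intro c hc hcd
          exact ((hdiffmem c).mp hcd).2 hc
        · intro c hc
          exact hRc c ((hdiffmem c).mp hc).1
        · intro hsd
          exact hsR ((hdiffmem s).mp hsd).1
        · intro c hc hcd
          by_cases hcR : c ∈ R
          · have hcnf : c ∈ PySem.Set.inter (pvReachSet z F) R := by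
              by_contra hnf
              exact hcd ((hdiffmem c).mpr ⟨hcR, hnf⟩)
            obtain ⟨⟨f, hf, hcnb⟩, -⟩ := (hnewf c).mp hcnf
            have hfreach : pvReach cells s f := hreach f (hFc f hf) (hFR f hf)
            have hadj : pvAdj f c := by
              show c ∈ pvNbrs f.2.2 f.1 f.2.1
              rw [hz f (hFc f hf)]
              exact hcnb
            exact pvReach.step hfreach hc hadj
          · exact hreach c hc hcR
        · intro c hc b hb hadj
          have hcR : c ∈ R := ((hdiffmem c).mp hc).1
          rcases hcap c hcR b hb hadj with hbR | hbF
          · by_cases hbnf : b ∈ PySem.Set.inter (pvReachSet z F) R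
            · exact Or.inr hbnf
            · exact Or.inl ((hdiffmem b).mpr ⟨hbR, hbnf⟩)
          · exfalso
            have hcnb : c ∈ pvNbrs z b.1 b.2.1 := by
              have h2 : c ∈ pvNbrs b.2.2 b.1 b.2.1 := pvAdj_symm hadj
              rwa [hz b hb] at h2
            exact ((hdiffmem c).mp hc).2 ((hnewf c).mpr ⟨⟨b, hbF, hcnb⟩, hcR⟩)
        · intro hne
          obtain ⟨e, he⟩ := List.exists_mem_of_ne_nil _ hne
          have hFne : F ≠ [] := fun h0 => hFe (by simp [h0])
          have h0 := hfuel hFne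
          have heR : e ∈ R := ((hnewf e).mp he).2
          have hlt : (PySem.Set.diff R (PySem.Set.inter (pvReachSet z F) R)).length <
              R.length := by
            by_contra hh
            push Not at hh
            have hfull := pvNodupSubsetFull (PySem.Set.nodup_diff _ _ hRn) hRn
              (fun c hc => ((hdiffmem c).mp hc).1) hh e heR
            exact ((hdiffmem e).mp hfull).2 he
          omega

theorem pvBfsFold_spec {cells : List (Int × Int × Int)} (nbs : List (Int × Int × Int)) :
    ∀ (v : PySem.Set (Int × Int × Int)) (q : List (Int × Int × Int)), v.Nodup →
      ∃ new, (nbs.foldl (pvBfsStep cells) (v, q)).1 = v ++ new ∧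
        (nbs.foldl (pvBfsStep cells) (v, q)).2 = q ++ new ∧
        (v ++ new).Nodup ∧ (∀ e ∈ new, e ∈ cells ∧ e ∈ nbs) ∧
        (∀ nb ∈ nbs, nb ∈ cells → nb ∈ (nbs.foldl (pvBfsStep cells) (v, q)).1) := by
  induction nbs with
  | nil =>
      intro v q hv
      exact ⟨[], by simp, by simp, by simpa using hv, by simp, by simp⟩
  | cons nb nbs ih =>
      intro v q hv
      rw [List.foldl_cons]
      by_cases hc : nb ∈ cells ∧ nb ∉ v
      · have hstep : pvBfsStep cells (v, q) nb = (v ++ [nb], q ++ [nb]) := by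
          unfold pvBfsStep
          rw [if_pos hc, PySem.Set.add_of_not_mem hc.2]
        rw [hstep]
        have hvn : (v ++ [nb]).Nodup := by
          have hn := PySem.Set.nodup_add _ nb hv
          rwa [PySem.Set.add_of_not_mem hc.2] at hn
        obtain ⟨new, h1, h2, h3, h4, h5⟩ := ih (v ++ [nb]) (q ++ [nb]) hvn
        refine ⟨nb :: new, ?_, ?_, ?_, ?_, ?_⟩
        · rw [h1, List.append_assoc]; rfl
        · rw [h2, List.append_assoc]; rfl
        · rw [List.append_assoc] at h3; exact h3
        · intro e he
          rcases List.mem_cons.mp he with h | he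
          · rw [h]; exact ⟨hc.1, List.mem_cons_self⟩
          · obtain ⟨he1, he2⟩ := h4 e he
            exact ⟨he1, List.mem_cons_of_mem _ he2⟩
        · intro x hx hxcells
          rcases List.mem_cons.mp hx with h | hx
          · rw [h, h1]
            exact List.mem_append_left _ (List.mem_append_right _ (List.mem_singleton_self _))
          · exact h5 x hx hxcells
      · have hstep : pvBfsStep cells (v, q) nb = (v, q) := by
          unfold pvBfsStep; rw [if_neg hc]
        rw [hstep]
        obtain ⟨new, h1, h2, h3, h4, h5⟩ := ih v q hv
        refine ⟨new, h1, h2, h3, ?_, ?_⟩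
        · intro e he
          obtain ⟨he1, he2⟩ := h4 e he
          exact ⟨he1, List.mem_cons_of_mem _ he2⟩
        · intro x hx hxcells
          rcases List.mem_cons.mp hx with h | hx
          · have hxv : x ∈ v := by
              by_contra hxv
              rw [h] at hxcells hxv
              exact hc ⟨hxcells, hxv⟩
            rw [h1]; exact List.mem_append_left _ hxv
          · exact h5 x hx hxcells

theorem pvBfs_good {cells : List (Int × Int × Int)} {z : Int} {s : Int × Int × Int}
    (hz : ∀ c ∈ cells, c.2.2 = z) :
    ∀ (fuel : Nat) (v : PySem.Set (Int × Int × Int)) (q : List (Int × Int × Int)),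
      v.Nodup → s ∈ v → (∀ c ∈ q, c ∈ v) →
      (∀ c ∈ v, c ∈ cells ∧ pvReach cells s c) →
      (∀ a ∈ v, a ∉ q → ∀ b ∈ cells, pvAdj a b → b ∈ v) →
      2 * (cells.length - v.length) + q.length ≤ fuel →
      pvGood cells s (pvBfs cells z fuel v q) := by
  intro fuel
  induction fuel with
  | zero =>
      intro v q hv hsv hq h2 hcl hm
      have hq0 : q = [] := by
        cases q with
        | nil => rfl
        | cons a q => rw [List.length_cons] at hm; omega
      subst hq0
      exact ⟨hv, hsv, fun c hc => (h2 c hc).1, fun c hc => (h2 c hc).2,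
        fun a ha b hb hadj => hcl a ha (List.not_mem_nil) b hb hadj⟩
  | succ fuel ih =>
      intro v q hv hsv hq h2 hcl hm
      cases q with
      | nil =>
          exact ⟨hv, hsv, fun c hc => (h2 c hc).1, fun c hc => (h2 c hc).2,
            fun a ha b hb hadj => hcl a ha (List.not_mem_nil) b hb hadj⟩
      | cons c q =>
          have hcv : c ∈ v := hq c List.mem_cons_self
          have hccells : c ∈ cells := (h2 c hcv).1
          have hcz : c.2.2 = z := hz c hccells
          obtain ⟨new, h1, h2', h3, h4, h5⟩ :=
            pvBfsFold_spec (cells := cells) (pvNbrs z c.1 c.2.1) v q hv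
          have hstep : pvBfs cells z (fuel + 1) v (c :: q) =
              pvBfs cells z fuel ((pvNbrs z c.1 c.2.1).foldl (pvBfsStep cells) (v, q)).1
                ((pvNbrs z c.1 c.2.1).foldl (pvBfsStep cells) (v, q)).2 := rfl
          rw [hstep]
          have hsub : ∀ d ∈ ((pvNbrs z c.1 c.2.1).foldl (pvBfsStep cells) (v, q)).1,
              d ∈ cells ∧ pvReach cells s d := by
            intro d hd
            rw [h1] at hd
            rcases List.mem_append.mp hd with hd | hd
            · exact h2 d hd
            · obtain ⟨hd1, hd2⟩ := h4 d hd
              refine ⟨hd1, pvReach.step (h2 c hcv).2 hd1 ?_⟩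
              show d ∈ pvNbrs c.2.2 c.1 c.2.1
              rw [hcz]
              exact hd2
          refine ih _ _ ?_ ?_ ?_ hsub ?_ ?_
          · rw [h1]; exact h3
          · rw [h1]; exact List.mem_append_left _ hsv
          · intro a ha
            rw [h2'] at ha
            rw [h1]
            rcases List.mem_append.mp ha with ha | ha
            · exact List.mem_append_left _ (hq a (List.mem_cons_of_mem _ ha))
            · exact List.mem_append_right _ ha
          · intro a ha hanq b hb hadj
            rw [h1] at ha
            rw [h2'] at hanq
            rcases List.mem_append.mp ha with ha | ha
            · by_cases hac : a = c
              · have hbmem : b ∈ pvNbrs z c.1 c.2.1 := by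
                  have hb2 : b ∈ pvNbrs a.2.2 a.1 a.2.1 := hadj
                  rw [hac] at hb2
                  rwa [hcz] at hb2
                exact h5 b hbmem hb
              · have hanq' : a ∉ c :: q := by
                  intro hmem
                  rcases List.mem_cons.mp hmem with h | h
                  · exact hac h
                  · exact hanq (List.mem_append_left _ h)
                rw [h1]
                exact List.mem_append_left _ (hcl a ha hanq' b hb hadj)
            · exact absurd (List.mem_append_right _ ha) hanq
          · have hlen1 : (v ++ new).length ≤ cells.length := by
              refine (List.subperm_of_subset h3 ?_).length_le
              intro d hd
              rcases List.mem_append.mp hd with hd | hd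
              · exact (h2 d hd).1
              · exact (h4 d hd).1
            rw [h1, h2']
            rw [List.length_append] at hlen1
            rw [List.length_cons] at hm
            rw [List.length_append, List.length_append]
            omega

-- ===== VERDICT (by name: the statement is the Claim_ definition above) =====
theorem pvGood_full_iff {cells : List (Int × Int × Int)} {s : Int × Int × Int}
    {V : List (Int × Int × Int)} (hcn : cells.Nodup) (hG : pvGood cells s V) :
    (V.length = cells.length ↔ ∀ c ∈ cells, pvReach cells s c) := by
  have hnd := hG.1
  have hsub := hG.2.2.1
  constructor
  · intro hlen c hc
    exact (pvGood_mem hG).mp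
      (pvNodupSubsetFull hnd hcn hsub (le_of_eq hlen.symm) c hc)
  · intro hall
    have hsup : ∀ c ∈ cells, c ∈ V := fun c hc => (pvGood_mem hG).mpr (hall c hc)
    have h1 := (List.subperm_of_subset hnd hsub).length_le
    have h2 := (List.subperm_of_subset hcn hsup).length_le
    omega

-- ===== VERDICT (by name: the statement is the Claim_ definition above) =====
theorem is_layer_connected_py_spec : Claim_equal_is_layer_connected_py := by
  intro width height z holes gate _
  unfold Spec_is_layer_connected_py
  unfold is_layer_connected_py is_layer_connected_py_alt
  obtain ⟨hcn, hz⟩ := pvCells_spec width height z holes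
  cases hc : pvCells width height z holes with
  | nil => simp
  | cons start rest =>
      rw [hc] at hcn hz
      have hs : start ∈ start :: rest := List.mem_cons_self
      have hstart : ∀ c ∈ ([start] : List (Int × Int × Int)),
          c ∈ (start :: rest) ∧ pvReach (start :: rest) start c := by
        intro c hcmem
        simp only [List.mem_singleton] at hcmem
        subst hcmem
        exact ⟨hs, pvReach.base⟩
      have hA : pvGood (start :: rest) start
          (pvBfs (start :: rest) z (2 * (start :: rest).length + 1) [start] [start]) := by
        apply pvBfs_good hz
        · exact List.nodup_singleton _
        · exact List.mem_singleton_self _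
        · intro c hcq; exact hcq
        · exact hstart
        · intro a ha hnq; exact absurd ha hnq
        · simp only [List.length_singleton]; omega
      have hnotstart : ∀ c : Int × Int × Int,
          c ∉ PySem.Set.diff (start :: rest) [start] → c ∈ (start :: rest) → c = start := by
        intro c hcd hcc
        by_contra hne
        exact hcd ((PySem.Set.mem_diff _ _ c).mpr ⟨hcc, by simp [hne]⟩)
      have hstartnot : start ∉ PySem.Set.diff (start :: rest) [start] := by
        intro h
        exact ((PySem.Set.mem_diff _ _ start).mp h).2 (List.mem_singleton_self _)
      have hB : ((pvLevels (start :: rest) z (start :: rest).length [start]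
            (PySem.Set.diff (start :: rest) [start])).isEmpty = true) ↔
          ∀ c ∈ (start :: rest), pvReach (start :: rest) start c := by
        refine pvLevels_iff hz hs (start :: rest).length [start]
          (PySem.Set.diff (start :: rest) [start]) (PySem.Set.nodup_diff _ _ hcn)
          ?_ ?_ ?_ hstartnot ?_ ?_ ?_
        · intro c hcmem
          simp only [List.mem_singleton] at hcmem
          subst hcmem
          exact hs
        · intro c hcmem
          simp only [List.mem_singleton] at hcmem
          subst hcmem
          exact hstartnot
        · intro c hcmem
          exact ((PySem.Set.mem_diff _ _ c).mp hcmem).1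
        · intro c hcc hcd
          rw [hnotstart c hcd hcc]
          exact pvReach.base
        · intro c hcmem b hb _
          by_cases hbd : b ∈ PySem.Set.diff (start :: rest) [start]
          · exact Or.inl hbd
          · right
            rw [hnotstart b hbd hb]
            exact List.mem_singleton_self _
        · intro _
          have hcons : (start :: PySem.Set.diff (start :: rest) [start]).Nodup :=
            List.nodup_cons.mpr ⟨hstartnot, PySem.Set.nodup_diff _ _ hcn⟩
          have hsubc : ∀ x ∈ start :: PySem.Set.diff (start :: rest) [start],
              x ∈ (start :: rest) := by
            intro x hx
            rcases List.mem_cons.mp hx with h | h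
            · rw [h]; exact hs
            · exact ((PySem.Set.mem_diff _ _ x).mp h).1
          have := (List.subperm_of_subset hcons hsubc).length_le
          rw [List.length_cons] at this
          omega
      have hiff := (pvGood_full_iff hcn hA).trans hB.symm
      show decide
          ((pvBfs (start :: rest) z (2 * (start :: rest).length + 1) [start] [start]).length =
            (start :: rest).length) =
        (pvLevels (start :: rest) z (start :: rest).length [start]
            (PySem.Set.diff (start :: rest) [start])).isEmpty
      rw [Bool.eq_iff_iff]
      simp only [decide_eq_true_eq]
      exact hiff
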